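-- pv_equiv track=rewrite | github.com/vallmeister/Programming | src/leetcode/biweekly_contest_176/q1.py | mapWordWeights
-- ===== SOURCE A (Python) =====
-- from typing import List
--
-- def mapWordWeights(words: List[str], weights: List[int]) -> str:
--     offset = ord('a')
--     ans = []
--     for word in words:
--         weight = 0
--         for c in word:
--             weight += weights[ord(c) - offset]
--             weight %= 26
--         ans.append(chr(25 - weight + offset))
--     return ''.join(ans)
-- ===== SOURCE B (Python) =====
-- def mapWordWeights(words, weights):
--     # One global stream of per-character weights, then prefix sums;
--     # each word's total is a difference of two prefix values.
--     stream = [weights[ord(c) - 97] for word in words for c in word]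
--     prefix = [0]
--     for x in stream:
--         prefix.append(prefix[-1] + x)
--     out = []
--     pos = 0
--     for word in words:
--         end = pos + len(word)
--         out.append(chr(122 - (prefix[end] - prefix[pos]) % 26))
--         pos = end
--     return ''.join(out)
-- ===== Notes on version B (the rewrite author's own statement) =====
-- stated objective: alternative
-- what changed: B flattens all words into one weight stream, builds a global prefix-sum array in one pass, and reads each word's total as a difference of two prefix values with a single final mod, instead of A's per-word char-by-char accumulation with a mod at every step.
import Mathlib
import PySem

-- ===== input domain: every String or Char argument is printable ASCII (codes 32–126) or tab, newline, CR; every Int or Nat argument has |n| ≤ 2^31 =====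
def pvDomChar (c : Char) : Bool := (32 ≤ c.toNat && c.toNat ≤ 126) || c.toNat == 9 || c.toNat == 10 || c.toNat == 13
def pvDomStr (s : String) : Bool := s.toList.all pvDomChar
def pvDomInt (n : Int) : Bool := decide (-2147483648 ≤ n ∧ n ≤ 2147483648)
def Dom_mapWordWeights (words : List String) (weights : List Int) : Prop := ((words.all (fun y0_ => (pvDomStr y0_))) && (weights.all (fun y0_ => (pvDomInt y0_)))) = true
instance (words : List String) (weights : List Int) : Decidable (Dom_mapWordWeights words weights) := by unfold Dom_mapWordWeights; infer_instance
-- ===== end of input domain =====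

-- B replaces A's per-word char-by-char mod-26 accumulation by a global prefix-sum array over
-- the concatenated weight stream; each word's total is a difference of two prefix values
-- (objective: alternative).

-- ===== PORT A =====
def mapWordWeights (words : List String) (weights : List Int) : String :=
  -- offset = ord('a') = 97; ans accumulated by append, as in A
  let ans : List Char := words.foldl (fun ans word =>
    let weight : Int := word.toList.foldl
      (fun weight c =>
        PySem.Int.mod (weight + PySem.List.pyGetD weights ((c.toNat : Int) - 97) 0) 26) 0
    ans ++ [Char.ofNat (25 - weight + 97).toNat]) []
  String.ofList ans

-- ===== PORT B =====
def mapWordWeights_alt (words : List String) (weights : List Int) : String :=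
  let stream : List Int := (words.flatMap (fun word => word.toList)).map
    (fun c => PySem.List.pyGetD weights ((c.toNat : Int) - 97) 0)
  let pfx : List Int := stream.foldl
    (fun p x => p ++ [PySem.List.pyGetD p (-1) 0 + x]) [0]
  let res : List Char × Int := words.foldl (fun st word =>
    let pos := st.2
    let e := pos + (word.toList.length : Int)
    (st.1 ++ [Char.ofNat
        (122 - PySem.Int.mod (PySem.List.pyGetD pfx e 0 - PySem.List.pyGetD pfx pos 0) 26).toNat],
     e)) ([], 0)
  String.ofList res.1

-- ===== PRECONDITION & SPEC =====
-- Pre_: exactly the inputs where Python A returns (no IndexError): every character of every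
-- word indexes weights in range (Python negative indices count from the end).
def Pre_mapWordWeights (words : List String) (weights : List Int) : Prop :=
  ∀ w ∈ words, ∀ c ∈ w.toList, PySem.Raise.InRange weights.length ((c.toNat : Int) - 97)
instance (words : List String) (weights : List Int) : Decidable (Pre_mapWordWeights words weights) := by unfold Pre_mapWordWeights; infer_instance

def pvWitness_mapWordWeights : List String × List Int := ([], [1])

def Spec_mapWordWeights (words : List String) (weights : List Int) (out : String) : Prop := out = mapWordWeights_alt words weights
instance (words : List String) (weights : List Int) (out : String) : Decidable (Spec_mapWordWeights words weights out) := by unfold Spec_mapWordWeights; infer_instance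

-- ===== CLAIM (what is proved, stated in full; the proofs are below) =====
def Claim_equal_mapWordWeights : Prop := ∀ (words : List String) (weights : List Int), Dom_mapWordWeights words weights → Pre_mapWordWeights words weights → Spec_mapWordWeights words weights (mapWordWeights words weights)

-- ===== LEMMAS AND PROOFS =====

-- A's stepwise mod-26 accumulation equals a single mod of the plain sum.
theorem foldl_mod_eq_mod_sum (g : Char → Int) (cs : List Char) (w0 : Int) :
    cs.foldl (fun w c => PySem.Int.mod (w + g c) 26) (PySem.Int.mod w0 26)
      = PySem.Int.mod (w0 + (cs.map g).sum) 26 := by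
  induction cs generalizing w0 with
  | nil => simp
  | cons c cs ih =>
    have h : PySem.Int.mod (PySem.Int.mod w0 26 + g c) 26 = PySem.Int.mod (w0 + g c) 26 := by
      simp only [PySem.Int.mod_eq_emod_of_pos (by norm_num : (0:Int) < 26), Int.emod_add_emod]
    simp only [List.foldl_cons, List.map_cons, List.sum_cons, h, ih (w0 + g c)]
    ring_nf

theorem take_append_len {α : Type} (A B : List α) (k : Nat) :
    (A ++ B).take (A.length + k) = A ++ B.take k := by
  induction A with
  | nil => simp
  | cons a A ih => simp [List.take_succ_cons, Nat.add_right_comm, ih]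

-- B's prefix-building loop produces the list of partial sums of the stream.
theorem prefix_eq (s : List Int) :
    s.foldl (fun p x => p ++ [PySem.List.pyGetD p (-1) 0 + x]) [0]
      = (List.range (s.length + 1)).map (fun i => (s.take i).sum) := by
  induction s using List.reverseRecOn with
  | nil => simp
  | append_singleton s x ih =>
    rw [List.foldl_append, ih]
    have hne : (List.range (s.length + 1)).map (fun i => (s.take i).sum) ≠ [] := by simp
    simp only [List.foldl_cons, List.foldl_nil]
    rw [PySem.List.pyGetD_neg_one _ 0 hne]
    have hlast : ((List.range (s.length + 1)).map (fun i => (s.take i).sum)).getLast hne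
        = s.sum := by
      rw [List.getLast_eq_getElem]
      simp
    rw [hlast]
    have hr : (List.range ((s ++ [x]).length + 1)).map (fun i => ((s ++ [x]).take i).sum)
        = (List.range (s.length + 1)).map (fun i => ((s ++ [x]).take i).sum)
          ++ [((s ++ [x]).take (s.length + 1)).sum] := by
      have : (s ++ [x]).length + 1 = (s.length + 1) + 1 := by simp
      rw [this, List.range_succ, List.map_append, List.map_singleton]
    rw [hr]
    congr 1
    · apply List.map_congr_left
      intro i hi
      simp only [List.mem_range] at hi
      rw [List.take_append_of_le_length (by omega)]
    · have : (s ++ [x]).take (s.length + 1) = s ++ [x] := by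
        apply List.take_of_length_le; simp
      simp [this]

-- indexing the partial-sum list at a natural position
theorem prefix_get (s : List Int) (n : Nat) (hn : n ≤ s.length) :
    PySem.List.pyGetD ((List.range (s.length + 1)).map (fun i => (s.take i).sum)) (n : Int) 0
      = (s.take n).sum := by
  rw [PySem.List.pyGetD_natCast]
  rw [List.getD_eq_getElem?_getD]
  rw [List.getElem?_map]
  simp [List.getElem?_range (by omega : n < s.length + 1)]

-- B's main loop, related to the per-word sums, by induction on the remaining words.
theorem loop_eq (words : List String) (g : Char → Int)
    (rest pre : List String) (acc : List Char) (n : Nat)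
    (h : words = pre ++ rest) (hnv : n = (pre.flatMap (fun w => w.toList)).length) :
    (rest.foldl (fun (st : List Char × Int) word =>
        let pos := st.2
        let e := pos + (word.toList.length : Int)
        (st.1 ++ [Char.ofNat
            (122 - PySem.Int.mod
              (PySem.List.pyGetD ((List.range (((words.flatMap (fun w => w.toList)).map g).length + 1)).map
                  (fun i => (((words.flatMap (fun w => w.toList)).map g).take i).sum)) e 0
               - PySem.List.pyGetD ((List.range (((words.flatMap (fun w => w.toList)).map g).length + 1)).map
                  (fun i => (((words.flatMap (fun w => w.toList)).map g).take i).sum)) pos 0) 26).toNat],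
         e))
      (acc, (n : Int))).1
    = acc ++ rest.map (fun w =>
        Char.ofNat (122 - PySem.Int.mod ((w.toList.map g).sum) 26).toNat) := by
  induction rest generalizing pre acc n with
  | nil => simp
  | cons w rest ih =>
    simp only [List.foldl_cons]
    set s : List Int := (words.flatMap (fun w => w.toList)).map g with hs
    have hsplit : words.flatMap (fun w => w.toList)
        = pre.flatMap (fun w => w.toList) ++ (w.toList ++ rest.flatMap (fun w => w.toList)) := by
      rw [h]; simp
    have hslen : s.length = (words.flatMap (fun w => w.toList)).length := by
      rw [hs, List.length_map]
    have hlenEq : (words.flatMap (fun w => w.toList)).length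
        = (pre.flatMap (fun w => w.toList)).length
          + (w.toList.length + (rest.flatMap (fun w => w.toList)).length) := by
      rw [hsplit]; simp only [List.length_append]
    have hnle : n ≤ s.length := by omega
    have hn2le : n + w.toList.length ≤ s.length := by omega
    have htake1 : s.take n = (pre.flatMap (fun v => v.toList)).map g := by
      rw [hs, hsplit, List.map_append]
      rw [List.take_append_of_le_length (by simp only [List.length_map]; omega)]
      apply List.take_of_length_le
      simp only [List.length_map]; omega
    have htake2 : s.take (n + w.toList.length)
        = (pre.flatMap (fun v => v.toList)).map g ++ w.toList.map g := by
      rw [hs, hsplit, List.map_append, List.map_append]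
      have hA : ((pre.flatMap (fun w => w.toList)).map g).length = n := by
        simp only [List.length_map]; omega
      rw [← hA, take_append_len]
      congr 1
      rw [List.take_append_of_le_length (by simp only [List.length_map]; omega)]
      apply List.take_of_length_le
      simp only [List.length_map]; omega
    have hcast : ((n : Int) + (w.toList.length : Int)) = ((n + w.toList.length : Nat) : Int) := by
      push_cast; ring
    have hchar :
        (122 - PySem.Int.mod
            (PySem.List.pyGetD ((List.range (s.length + 1)).map (fun i => (s.take i).sum))
                ((n : Int) + (w.toList.length : Int)) 0
             - PySem.List.pyGetD ((List.range (s.length + 1)).map (fun i => (s.take i).sum))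
                (n : Int) 0) 26)
        = (122 - PySem.Int.mod ((w.toList.map g).sum) 26) := by
      rw [hcast, prefix_get s _ hn2le, prefix_get s n hnle, htake1, htake2]
      simp
    have hnext : n + w.toList.length = ((pre ++ [w]).flatMap (fun v => v.toList)).length := by
      simp only [List.flatMap_append, List.length_append, List.flatMap_cons, List.flatMap_nil,
        List.append_nil]
      omega
    have hthis := ih (pre ++ [w])
      (acc ++ [Char.ofNat (122 - PySem.Int.mod ((w.toList.map g).sum) 26).toNat])
      (n + w.toList.length) (by rw [h]; simp) hnext
    rw [hcast]
    simp only [List.map_cons]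
    rw [hcast] at hchar
    simp only [hchar]
    rw [hthis]
    simp

-- ===== VERDICT (by name: the statement is the Claim_ definition above) =====
theorem mapWordWeights_spec : Claim_equal_mapWordWeights := by
  intro words weights _ _
  unfold Spec_mapWordWeights
  simp only [mapWordWeights, mapWordWeights_alt]
  rw [PySem.List.foldl_append_singleton_eq_map, prefix_eq]
  have hl := loop_eq words (fun c => PySem.List.pyGetD weights ((c.toNat : Int) - 97) 0)
    words [] [] 0 (by simp) (by simp)
  rw [Nat.cast_zero] at hl
  rw [hl]
  simp only [List.nil_append]
  congr 1
  apply List.map_congr_left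
  intro word _
  set g : Char → Int := fun c => PySem.List.pyGetD weights ((c.toNat : Int) - 97) 0 with hg
  have hA : word.toList.foldl (fun w c => PySem.Int.mod (w + g c) 26) 0
      = PySem.Int.mod ((word.toList.map g).sum) 26 := by
    have := foldl_mod_eq_mod_sum g word.toList 0
    simpa using this
  rw [hA]
  congr 1
  omega
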